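-- pv_equiv track=rewrite | github.com/sapphirepp/sapphireppplot | src/sapphireppplot/plot_properties_vfp.py | create_lms_indices
-- ===== SOURCE A (Python) =====
-- def create_lms_indices(expansion_order: int) -> list[list[int]]:
--     """
--     Create mapping between system index :math:`i` and spherical harmonic indices :math:`(l,m,s)`.
--
--     Parameters
--     ----------
--     expansion_order : int
--         Expansion order `l_max`.
--
--     Returns
--     -------
--     lms_indices : list[list[int]]
--         Mapping `lms_indices[i] = [l,m,s]`.
--     """
--     system_size = (expansion_order + 1) ** 2
--     lms_indices = []
--
--     l = 0  # noqa: E741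
--     m = 0
--     for _ in range(system_size):
--         s = 0 if m <= 0 else 1
--         lms_indices += [[l, abs(m), s]]
--
--         m += 1
--         if m > l:
--             l += 1
--             m = -l
--     return lms_indices
-- ===== SOURCE B (Python) =====
-- import math
--
--
-- def _lms(i):
--     l = math.isqrt(i)
--     m = i - l * l - l
--     return [l, abs(m), 0 if m <= 0 else 1]
--
--
-- def create_lms_indices(expansion_order: int) -> list[list[int]]:
--     return [_lms(i) for i in range((expansion_order + 1) ** 2)]
-- ===== Notes on version B (the rewrite author's own statement) =====
-- stated objective: alternative
-- what changed: Replaces the running (l,m) state machine with a per-index closed form: for each i, l = isqrt(i), m = i - l*l - l, built as a list comprehension.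
import Mathlib
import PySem

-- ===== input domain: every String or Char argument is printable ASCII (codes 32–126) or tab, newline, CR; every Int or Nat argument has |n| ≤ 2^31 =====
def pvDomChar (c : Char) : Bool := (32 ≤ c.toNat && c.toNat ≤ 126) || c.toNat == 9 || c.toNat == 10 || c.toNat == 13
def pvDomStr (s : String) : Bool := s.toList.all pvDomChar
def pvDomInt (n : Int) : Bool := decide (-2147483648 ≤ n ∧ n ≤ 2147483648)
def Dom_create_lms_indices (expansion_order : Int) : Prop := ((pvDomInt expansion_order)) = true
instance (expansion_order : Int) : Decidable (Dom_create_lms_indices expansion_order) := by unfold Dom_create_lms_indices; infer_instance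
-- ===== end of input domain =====

-- B replaces A's running (l,m) state machine by a per-index closed form (l = isqrt i, m = i - l*l - l); alternative decomposition, same cost.

-- ===== PORT A =====
-- A's for-loop over range(system_size) with mutable state l, m, lms_indices, as structural recursion on the iteration count.
def createLmsLoopA : Nat → Int → Int → List (List Int) → List (List Int)
  | 0, _, _, acc => acc
  | n + 1, l, m, acc =>
    let s : Int := if m ≤ 0 then 0 else 1
    let acc' := acc ++ [[l, |m|, s]]
    let m' := m + 1
    if m' > l then createLmsLoopA n (l + 1) (-(l + 1)) acc'
    else createLmsLoopA n l m' acc'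

def create_lms_indices (expansion_order : Int) : List (List Int) :=
  let system_size : Int := (expansion_order + 1) ^ 2
  createLmsLoopA system_size.toNat 0 0 []

-- ===== PORT B =====
-- helper _lms(i): math.isqrt ported as Nat.sqrt on i.toNat (i ≥ 0 on every call)
def lmsOf (i : Int) : List Int :=
  let l : Int := (Nat.sqrt i.toNat : Nat)
  let m : Int := i - l * l - l
  [l, |m|, if m ≤ 0 then 0 else 1]

def create_lms_indices_alt (expansion_order : Int) : List (List Int) :=
  (PySem.List.pyRange 0 ((expansion_order + 1) ^ 2) 1).map lmsOf

-- ===== PRECONDITION & SPEC =====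
def Spec_create_lms_indices (expansion_order : Int) (out : List (List Int)) : Prop := out = create_lms_indices_alt expansion_order
instance (expansion_order : Int) (out : List (List Int)) : Decidable (Spec_create_lms_indices expansion_order out) := by unfold Spec_create_lms_indices; infer_instance

-- ===== CLAIM (what is proved, stated in full; the proofs are below) =====
def Claim_equal_create_lms_indices : Prop := ∀ (expansion_order : Int), Dom_create_lms_indices expansion_order → Spec_create_lms_indices expansion_order (create_lms_indices expansion_order)

-- ===== LEMMAS AND PROOFS =====

-- lmsOf at a nonnegative index, written through Nat.sqrt
lemma lmsOf_natCast (a : Nat) :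
    lmsOf (a : Int) =
      [((Nat.sqrt a : Nat) : Int), |(a : Int) - (Nat.sqrt a) * (Nat.sqrt a) - (Nat.sqrt a)|,
        if ((a : Int) - (Nat.sqrt a) * (Nat.sqrt a) - (Nat.sqrt a)) ≤ 0 then 0 else 1] := by
  simp [lmsOf]

-- A's loop, started at index a with the invariant state (l = √a, m = a - l² - l),
-- produces exactly the closed-form rows for indices a, a+1, …, a+n-1.
lemma createLmsLoopA_eq (n : Nat) : ∀ (a : Nat) (acc : List (List Int)),
    createLmsLoopA n ((Nat.sqrt a : Nat) : Int) ((a : Int) - (Nat.sqrt a) * (Nat.sqrt a) - (Nat.sqrt a)) acc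
      = acc ++ (PySem.List.pyRange (a : Int) ((a : Int) + n) 1).map lmsOf := by
  induction n with
  | zero =>
    intro a acc
    simp [createLmsLoopA, PySem.List.pyRange_one_eq_nil]
  | succ n ih =>
    intro a acc
    have hlt : (a : Int) < (a : Int) + (n + 1 : Nat) := by push_cast; omega
    rw [PySem.List.pyRange_one_cons hlt]
    set l : Nat := Nat.sqrt a with hl
    have hle : l * l ≤ a := by have := Nat.sqrt_le' a; simpa [pow_two, hl] using this
    have hlt2 : a < (l + 1) * (l + 1) := by have := Nat.lt_succ_sqrt' a; simpa [pow_two, Nat.succ_eq_add_one, hl] using this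
    simp only [List.map_cons, lmsOf_natCast]
    rw [createLmsLoopA]
    by_cases hadv : ((a : Int) - l * l - l) + 1 > (l : Int)
    · -- m+1 > l : advance; then a + 1 = (l+1)², so √(a+1) = l+1 and m' = -(l+1)
      have ha1 : a + 1 = (l + 1) * (l + 1) := by
        have : (l + 1) * (l + 1) ≤ a + 1 := by push_cast at hadv ⊢; nlinarith
        omega
      have hs : Nat.sqrt (a + 1) = l + 1 := by
        rw [ha1, ← pow_two]; exact Nat.sqrt_eq' (l + 1)
      rw [if_pos hadv]
      have := ih (a + 1) (acc ++ [[(l : Int), |(a : Int) - l * l - l|,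
        if ((a : Int) - l * l - l) ≤ 0 then 0 else 1]])
      rw [hs] at this
      have harg1 : ((l : Int) + 1) = ((l + 1 : Nat) : Int) := by push_cast; ring
      have harg2 : (-(((l + 1 : Nat) : Int))) = (((a + 1 : Nat) : Int) - ((l + 1 : Nat) : Int) * ((l + 1 : Nat) : Int) - ((l + 1 : Nat) : Int)) := by
        have := ha1; push_cast; push_cast at this; nlinarith
      rw [harg1, harg2, this]
      have hend : ((a : Int) + ((n + 1 : Nat) : Int)) = (((a + 1 : Nat) : Int) + (n : Int)) := by push_cast; ring
      simp only [List.append_assoc, List.cons_append, List.nil_append]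
      push_cast [hend]
      ring_nf
      rw [hl]
    · -- m+1 ≤ l : stay; √(a+1) = l and m' = m+1
      have hs : Nat.sqrt (a + 1) = l := by
        have h1 : l * l ≤ a + 1 := by omega
        have h2 : a + 1 < (l + 1) * (l + 1) := by
          push_cast at hadv; nlinarith
        exact le_antisymm (Nat.le_of_lt_succ (Nat.sqrt_lt.2 h2)) (Nat.le_sqrt.2 h1)
      rw [if_neg hadv]
      have := ih (a + 1) (acc ++ [[(l : Int), |(a : Int) - l * l - l|,
        if ((a : Int) - l * l - l) ≤ 0 then 0 else 1]])
      rw [hs] at this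
      have harg2 : ((a : Int) - l * l - l + 1) = ((a + 1 : Nat) : Int) - (l : Int) * l - l := by push_cast; ring
      rw [harg2, this]
      have hend : ((a : Int) + ((n : Int) + 1)) = (((a + 1 : Nat) : Int) + (n : Int)) := by push_cast; ring
      simp only [List.append_assoc, List.cons_append, List.nil_append]
      push_cast [hend]
      ring_nf
      rw [hl]

-- ===== VERDICT (by name: the statement is the Claim_ definition above) =====
theorem create_lms_indices_spec : Claim_equal_create_lms_indices := by
  intro e _
  unfold Spec_create_lms_indices create_lms_indices create_lms_indices_alt
  have hnn : (0 : Int) ≤ (e + 1) ^ 2 := sq_nonneg _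
  have hcast : ((((e + 1) ^ 2).toNat : Nat) : Int) = (e + 1) ^ 2 := Int.toNat_of_nonneg hnn
  have h := createLmsLoopA_eq ((e + 1) ^ 2).toNat 0 []
  simp only [Nat.sqrt_zero, Nat.cast_zero, mul_zero, sub_zero, zero_add, List.nil_append] at h
  simp only []
  rw [h, hcast]
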